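-- pv_equiv track=rewrite | github.com/plturrell/cryptotrading | src/cryptotrading/core/protocols/mcp/security/authentication.py | sanitize_string
-- ===== SOURCE A (Python) =====
-- def sanitize_string(value: str, max_length: int = 1000) -> str:
--     """Sanitize string input"""
--     if not isinstance(value, str):
--         return ""
--
--     # Truncate
--     if len(value) > max_length:
--         value = value[:max_length]
--
--     # Remove null bytes and control characters
--     value = ''.join(char for char in value if ord(char) >= 32 or char in '\t\n\r')
--
--     # Basic XSS prevention
--     dangerous_chars = ['<', '>', '"', "'", '&', '\x00']
--     for char in dangerous_chars:
--         value = value.replace(char, '')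
--
--     return value.strip()
-- ===== SOURCE B (Python) =====
-- def sanitize_string(value: str, max_length: int = 1000) -> str:
--     """Sanitize string input: one table-driven deletion pass instead of
--     a filter pass followed by six replace passes."""
--     if not isinstance(value, str):
--         return ""
--     table = {c: None for c in range(32) if c not in (9, 10, 13)}
--     for ch in '<>"\'&\x00':
--         table[ord(ch)] = None
--     return value[:max_length].translate(table).strip()
-- ===== Notes on version B (the rewrite author's own statement) =====
-- stated objective: idiomatic
-- what changed: The control-character filter comprehension and the six sequential str.replace passes are replaced by one precomputed deletion table applied in a single str.translate pass, followed by the same strip.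
import Mathlib
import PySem

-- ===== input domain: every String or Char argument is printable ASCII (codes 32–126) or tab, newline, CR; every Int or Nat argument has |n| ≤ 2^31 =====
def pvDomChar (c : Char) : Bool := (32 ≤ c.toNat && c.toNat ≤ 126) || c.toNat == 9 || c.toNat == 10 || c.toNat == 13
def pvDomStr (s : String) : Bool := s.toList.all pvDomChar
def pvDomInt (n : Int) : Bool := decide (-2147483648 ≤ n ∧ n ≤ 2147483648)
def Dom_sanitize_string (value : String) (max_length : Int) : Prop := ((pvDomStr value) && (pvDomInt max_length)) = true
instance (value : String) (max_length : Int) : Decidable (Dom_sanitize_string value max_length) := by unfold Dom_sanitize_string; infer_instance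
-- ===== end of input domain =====

-- B replaces A's filter comprehension plus six sequential replace passes by one
-- precomputed deletion table applied in a single pass (str.translate), then the same strip.

-- ===== PORT A =====
-- literal port of A: conditional truncation, filter comprehension, six replace passes, strip
def sanitize_string (value : String) (max_length : Int) : String :=
  let v0 := value.toList
  let v1 := if (v0.length : Int) > max_length then PySem.Chars.slice v0 none (some max_length) else v0
  let v2 := v1.filter (fun c => decide (32 ≤ c.toNat) || PySem.Chars.isIn [c] ['\t', '\n', '\r'])
  let dangerous : List Char := ['<', '>', '"', '\'', '&', '\x00']
  let v3 := dangerous.foldl (fun v c => PySem.Chars.replace v [c] []) v2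
  String.ofList (PySem.Chars.strip v3)

-- ===== PORT B =====
-- port of B: build the deletion table (codes 0..31 except 9/10/13, plus the dangerous
-- chars' codes), truncate, delete table members in one pass (str.translate with
-- all-None values = drop the chars whose code is in the table; exact), strip
def sanitize_string_alt (value : String) (max_length : Int) : String :=
  let table : List Int :=
    ((PySem.List.pyRange 0 32 1).filter (fun c => !(c == 9 || c == 10 || c == 13)))
      ++ (['<', '>', '"', '\'', '&', '\x00'].map (fun ch => (ch.toNat : Int)))
  let truncated := PySem.Chars.slice value.toList none (some max_length)
  let translated := truncated.filter (fun c => !(table.contains (c.toNat : Int)))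
  String.ofList (PySem.Chars.strip translated)

-- ===== PRECONDITION & SPEC =====
def Spec_sanitize_string (value : String) (max_length : Int) (out : String) : Prop := out = sanitize_string_alt value max_length
instance (value : String) (max_length : Int) (out : String) : Decidable (Spec_sanitize_string value max_length out) := by unfold Spec_sanitize_string; infer_instance

-- ===== CLAIM (what is proved, stated in full; the proofs are below) =====
def Claim_equal_sanitize_string : Prop := ∀ (value : String) (max_length : Int), Dom_sanitize_string value max_length → Spec_sanitize_string value max_length (sanitize_string value max_length)

-- ===== LEMMAS AND PROOFS =====

lemma char_eq_iff (x c : Char) : (x = c) ↔ x.toNat = c.toNat := by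
  unfold Char.toNat
  rw [UInt32.toNat_inj, Char.ext_iff]

lemma isIn_singleton (x : Char) (l : List Char) : PySem.Chars.isIn [x] l = true ↔ x ∈ l := by
  rw [PySem.Chars.isIn_iff_infix]
  constructor
  · intro h; exact h.mem (by simp)
  · intro h; obtain ⟨a, b, rfl⟩ := List.mem_iff_append.mp h; exact ⟨a, b, by simp⟩

-- replace.go with enough fuel and a single-char pattern replaced by '' is a filter
lemma replace_go_single (c : Char) :
    ∀ (fuel : Nat) (l acc : List Char), l.length ≤ fuel →
      PySem.Chars.replace.go [c] [] fuel l acc = acc.reverse ++ l.filter (fun x => x ≠ c) := by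
  intro fuel
  induction fuel with
  | zero =>
    intro l acc h
    have : l = [] := List.eq_nil_of_length_eq_zero (Nat.le_zero.mp h)
    subst this
    simp [PySem.Chars.replace.go]
  | succ n ih =>
    intro l acc h
    cases l with
    | nil => simp [PySem.Chars.replace.go]
    | cons x t =>
      simp only [PySem.Chars.replace.go]
      by_cases hx : x = c
      · subst hx
        have hp : List.isPrefixOf [x] (x :: t) = true := by simp [List.isPrefixOf]
        rw [if_pos hp]
        simp only [List.length_cons] at h
        rw [ih _ _ (by simpa using Nat.le_of_succ_le_succ h)]
        simp
      · have hp : List.isPrefixOf [c] (x :: t) = false := by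
          simp [List.isPrefixOf]
          intro hcx; exact hx hcx.symm
        rw [if_neg (by simp [hp])]
        simp only [List.length_cons] at h
        rw [ih _ _ (Nat.le_of_succ_le_succ h)]
        simp [hx]

-- str.replace(c, '') deletes every occurrence of the single character c
lemma replace_single (c : Char) (s : List Char) :
    PySem.Chars.replace s [c] [] = s.filter (fun x => x ≠ c) := by
  rw [PySem.Chars.replace]
  simp only [List.isEmpty_cons, if_false, Bool.false_eq_true]
  exact replace_go_single c s.length s [] (le_refl _)

-- A's conditional truncation equals B's unconditional slice
lemma trunc_eq (v : List Char) (m : Int) :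
    (if (v.length : Int) > m then PySem.Chars.slice v none (some m) else v)
      = PySem.Chars.slice v none (some m) := by
  split_ifs with h
  · rfl
  · have h' : (v.length : Int) ≤ m := not_lt.mp h
    have h0 : (0 : Int) ≤ m := le_trans (by positivity) h'
    rw [PySem.Chars.slice_eq_listSlice, PySem.List.slice_to _ h0, List.take_of_length_le]
    omega

-- A's keep-predicate (control-char filter then the six dangerous-char deletions)
-- coincides with B's table-based keep-predicate
lemma pred_pointwise (x : Char) :
    (((decide (32 ≤ x.toNat) || PySem.Chars.isIn [x] ['\t', '\n', '\r']))
      && (decide (x ≠ '<') && (decide (x ≠ '>') && (decide (x ≠ '"') && (decide (x ≠ '\'') && (decide (x ≠ '&') && decide (x ≠ '\x00')))))))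
    = (!((((PySem.List.pyRange 0 32 1).filter (fun c => !(c == 9 || c == 10 || c == 13)))
        ++ (['<', '>', '"', '\'', '&', '\x00'].map (fun ch => (ch.toNat : Int)))).contains (x.toNat : Int))) := by
  have h1 : ('\t').toNat = 9 := rfl
  have h2 : ('\n').toNat = 10 := rfl
  have h3 : ('\r').toNat = 13 := rfl
  have h4 : ('<').toNat = 60 := rfl
  have h5 : ('>').toNat = 62 := rfl
  have h6 : ('"').toNat = 34 := rfl
  have h7 : ('\'').toNat = 39 := rfl
  have h8 : ('&').toNat = 38 := rfl
  have h9 : ('\x00').toNat = 0 := rfl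
  have hmap : (['<', '>', '"', '\'', '&', '\x00'].map (fun ch => (ch.toNat : Int)))
      = [60, 62, 34, 39, 38, 0] := by decide
  rw [hmap]
  simp only [Bool.and_eq_true, Bool.or_eq_true, decide_eq_true_eq, Bool.not_eq_true',
    List.contains_eq_mem, List.mem_append, List.mem_filter,
    List.mem_cons, PySem.List.mem_pyRange_one, isIn_singleton,
    List.not_mem_nil, or_false, char_eq_iff, h1, h2, h3, h4, h5, h6, h7, h8, h9,
    Bool.not_eq_eq_eq_not, Bool.not_true, Bool.or_eq_false_iff, beq_eq_false_iff_ne, ne_eq]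
  rw [Bool.eq_iff_iff]
  simp only [Bool.and_eq_true, Bool.or_eq_true, decide_eq_true_eq, Bool.not_eq_true',
    decide_eq_false_iff_not, isIn_singleton, List.mem_cons, List.not_mem_nil, or_false,
    char_eq_iff, h1, h2, h3]
  omega

-- ===== VERDICT (by name: the statement is the Claim_ definition above) =====
theorem sanitize_string_spec : Claim_equal_sanitize_string := by
  intro value m _
  unfold Spec_sanitize_string sanitize_string sanitize_string_alt
  simp only [trunc_eq, List.foldl_cons, List.foldl_nil, replace_single, List.filter_filter]
  congr 1
  congr 1
  apply List.filter_congr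
  intro x _
  rw [← pred_pointwise x]
  ac_rfl
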